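-- pv_equiv track=rewrite | github.com/Andribe1411/T201FOR1 | timi_11_4_24.py | isbn_is_ok
-- ===== SOURCE A (Python) =====
-- LENGTH_OF_ISBN = 13
--
-- POSITIONS_OF_DASHES = [1, 5, 11]
--
-- def isbn_is_ok(isbn):
--     if len(isbn) != LENGTH_OF_ISBN:
--         return False
--     for i,c in enumerate(isbn):
--         if i in POSITIONS_OF_DASHES:
--             if c != '-':
--                 return False
--         else:
--             if not c.isdigit():
--                 return False
--     return True
-- ===== SOURCE B (Python) =====
-- LENGTH_OF_ISBN = 13
--
-- POSITIONS_OF_DASHES = [1, 5, 11]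
--
-- def isbn_is_ok(isbn):
--     if len(isbn) != LENGTH_OF_ISBN:
--         return False
--     if not (isbn[1] == '-' and isbn[5] == '-' and isbn[11] == '-'):
--         return False
--     digits = isbn[0:1] + isbn[2:5] + isbn[6:11] + isbn[12:13]
--     return digits.isdigit()
-- ===== Notes on version B (the rewrite author's own statement) =====
-- stated objective: simpler
-- what changed: Replaced A's per-character enumerate loop with early returns by three positional dash checks followed by one bulk isdigit() test on the concatenated non-dash slices.
import Mathlib
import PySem

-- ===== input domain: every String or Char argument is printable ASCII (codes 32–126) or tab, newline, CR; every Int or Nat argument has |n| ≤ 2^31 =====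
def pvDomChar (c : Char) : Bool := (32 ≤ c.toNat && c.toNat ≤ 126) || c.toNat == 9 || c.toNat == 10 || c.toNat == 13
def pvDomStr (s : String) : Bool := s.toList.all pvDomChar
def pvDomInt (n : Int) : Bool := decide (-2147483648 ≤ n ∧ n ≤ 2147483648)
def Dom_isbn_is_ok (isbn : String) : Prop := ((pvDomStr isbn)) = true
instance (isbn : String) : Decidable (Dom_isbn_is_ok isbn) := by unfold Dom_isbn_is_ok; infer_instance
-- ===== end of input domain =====

-- B replaces A's per-character enumerate loop by three positional dash checks plus one
-- bulk isdigit test on the concatenated non-dash slices (objective: simpler).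

-- ===== PORT A =====
-- the 'for i,c in enumerate(isbn)' loop with its early returns
def isbnLoopA : List (Int × Char) → Bool
  | [] => true
  | (i, c) :: rest =>
    if i ∈ ([1, 5, 11] : List Int) then
      if c ≠ '-' then false else isbnLoopA rest
    else
      if ¬ (PySem.Chars.isdigit c = true) then false else isbnLoopA rest

def isbn_is_ok (isbn : String) : Bool :=
  if PySem.Str.len isbn ≠ 13 then false
  else isbnLoopA (PySem.List.enumerate isbn.toList 0)

-- ===== PORT B =====
def isbn_is_ok_alt (isbn : String) : Bool :=
  if PySem.Str.len isbn ≠ 13 then false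
  else if ¬ (PySem.Str.pyGet? isbn 1 = some '-' ∧ PySem.Str.pyGet? isbn 5 = some '-' ∧
             PySem.Str.pyGet? isbn 11 = some '-') then false
  else
    PySem.Chars.strIsdigit
      (PySem.List.slice isbn.toList (some 0) (some 1) ++
       PySem.List.slice isbn.toList (some 2) (some 5) ++
       PySem.List.slice isbn.toList (some 6) (some 11) ++
       PySem.List.slice isbn.toList (some 12) (some 13))

-- ===== PRECONDITION & SPEC =====
def Spec_isbn_is_ok (isbn : String) (out : Bool) : Prop := out = isbn_is_ok_alt isbn
instance (isbn : String) (out : Bool) : Decidable (Spec_isbn_is_ok isbn out) := by unfold Spec_isbn_is_ok; infer_instance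

-- ===== CLAIM (what is proved, stated in full; the proofs are below) =====
def Claim_equal_isbn_is_ok : Prop := ∀ (isbn : String), Dom_isbn_is_ok isbn → Spec_isbn_is_ok isbn (isbn_is_ok isbn)

-- ===== LEMMAS AND PROOFS =====

lemma list13_exists (cs : List Char) (h : cs.length = 13) :
    ∃ a b c d e f g i j k l m n, cs = [a, b, c, d, e, f, g, i, j, k, l, m, n] := by
  rcases cs with _ | ⟨a, cs⟩; · simp at h
  rcases cs with _ | ⟨b, cs⟩; · simp at h
  rcases cs with _ | ⟨c, cs⟩; · simp at h
  rcases cs with _ | ⟨d, cs⟩; · simp at h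
  rcases cs with _ | ⟨e, cs⟩; · simp at h
  rcases cs with _ | ⟨f, cs⟩; · simp at h
  rcases cs with _ | ⟨g, cs⟩; · simp at h
  rcases cs with _ | ⟨i, cs⟩; · simp at h
  rcases cs with _ | ⟨j, cs⟩; · simp at h
  rcases cs with _ | ⟨k, cs⟩; · simp at h
  rcases cs with _ | ⟨l, cs⟩; · simp at h
  rcases cs with _ | ⟨m, cs⟩; · simp at h
  rcases cs with _ | ⟨n, cs⟩; · simp at h
  simp at h
  subst h
  exact ⟨a, b, c, d, e, f, g, i, j, k, l, m, n, rfl⟩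

-- ===== VERDICT (by name: the statement is the Claim_ definition above) =====
theorem isbn_is_ok_spec : Claim_equal_isbn_is_ok := by
  intro isbn _
  unfold Spec_isbn_is_ok isbn_is_ok isbn_is_ok_alt
  by_cases h : isbn.length = 13
  · have hl : isbn.toList.length = 13 := by simp [h]
    have h' : ((isbn.length : Int) = 13) := by exact_mod_cast h
    obtain ⟨a, b, c, d, e, f, g, i, j, k, l, m, n, hcs⟩ := list13_exists isbn.toList hl
    norm_num [hcs, h', isbnLoopA, PySem.List.enumerate, PySem.List.slice, PySem.List.clampIdx,
      PySem.List.pyGet?, PySem.List.pyIdx?, PySem.Chars.strIsdigit, List.all,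
      PySem.Str.len_eq]
    norm_num [show ((2:Int).toNat) = 2 from rfl, show ((5:Int).toNat) = 5 from rfl,
      show ((6:Int).toNat) = 6 from rfl, show ((11:Int).toNat) = 11 from rfl,
      show ((12:Int).toNat) = 12 from rfl, show ((13:Int).toNat) = 13 from rfl,
      List.getElem_cons_succ, List.getElem_cons_zero,
      List.take_succ_cons, List.drop_succ_cons, List.all_cons, List.all_nil]
    rw [Bool.eq_iff_iff]
    simp only [Bool.and_eq_true, decide_eq_true_eq]
    tauto
  · have h' : ¬((isbn.length : Int) = 13) := by exact_mod_cast h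
    simp [PySem.Str.len_eq, h']
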